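-- pv_equiv track=rewrite | github.com/981377660LMT/algorithm-study | 22_专题/枚举/枚举分割点-前后缀分解/Non-Overlapping Pairs of Sublists.py | solve
-- ===== SOURCE A (Python) =====
-- from itertools import accumulate
--
-- MOD = int(1e9 + 7)
--
-- def solve(nums, k):
--     def getDp(nums):
--         """每个结尾有多少个符合的数组"""
--         dp = []
--         count = 0
--         for num in nums:
--             if num >= k:
--                 count += 1
--             else:
--                 count = 0
--             dp.append(count)
--         return dp
--
--     dp1, dp2 = getDp(nums), getDp(nums[::-1])
--     suffixSum = list(accumulate(dp2))[::-1]
--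
--     res = 0
--     for i in range(len(dp1) - 1):
--         res += dp1[i] * suffixSum[i + 1]
--         res %= MOD
--     return res
-- ===== SOURCE B (Python) =====
-- MOD = int(1e9 + 7)
--
-- def solve(nums, k):
--     # One forward pass over maximal runs of elements >= k: for a run of
--     # length L there are L*(L+1)//2 qualifying sublists inside it and
--     # (L+2)*(L+1)*L*(L-1)//24 non-overlapping ordered pairs wholly inside it.
--     res = 0
--     prefix = 0  # qualifying sublists contained in completed earlier runs
--     run = 0
--     for num in nums:
--         if num >= k:
--             run += 1
--         elif run:
--             t = run * (run + 1) // 2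
--             res = (res + t * prefix + (run + 2) * (run + 1) * run * (run - 1) // 24) % MOD
--             prefix += t
--             run = 0
--     if run:
--         t = run * (run + 1) // 2
--         res = (res + t * prefix + (run + 2) * (run + 1) * run * (run - 1) // 24) % MOD
--     return res
-- ===== Notes on version B (the rewrite author's own statement) =====
-- stated objective: faster
-- what changed: Instead of building dp arrays in both directions plus a reversed running-sum array and summing dp1[i]*suffixSum[i+1] over all split points, B makes one forward pass over the maximal runs of elements >= k, using the closed forms L(L+1)//2 for sublists inside a run and (L+2)(L+1)L(L-1)//24 for non-overlapping pairs inside a run, accumulating cross-run pairs with a running prefix count.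
import Mathlib
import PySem

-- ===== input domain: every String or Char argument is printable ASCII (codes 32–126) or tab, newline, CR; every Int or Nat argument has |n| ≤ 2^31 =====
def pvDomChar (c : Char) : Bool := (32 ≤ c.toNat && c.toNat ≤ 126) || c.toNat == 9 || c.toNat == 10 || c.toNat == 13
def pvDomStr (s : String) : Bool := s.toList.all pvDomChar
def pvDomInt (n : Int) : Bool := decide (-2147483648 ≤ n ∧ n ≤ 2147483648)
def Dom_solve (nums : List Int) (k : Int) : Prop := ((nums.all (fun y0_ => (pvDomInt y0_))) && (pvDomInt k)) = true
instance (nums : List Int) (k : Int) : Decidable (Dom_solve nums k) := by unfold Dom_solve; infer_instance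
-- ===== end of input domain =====

-- B replaces A's four length-n auxiliary arrays by a single forward pass over the
-- maximal runs of elements ≥ k, using closed-form run counts (objective: faster by a
-- constant factor, O(1) extra space).

-- ===== PORT A =====
-- literal transliteration of Source A; nums[::-1] is List.reverse (PySem.List.slice?_none_none_neg_one)
def solve (nums : List Int) (k : Int) : Int :=
  let getDp : List Int → List Int := fun ns =>
    (ns.foldl (fun (st : Int × List Int) num =>
      if num ≥ k then (st.1 + 1, st.2 ++ [st.1 + 1]) else ((0 : Int), st.2 ++ [(0 : Int)]))
      (0, [])).2
  let dp1 := getDp nums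
  let dp2 := getDp nums.reverse
  let suffixSum :=
    ((dp2.foldl (fun (st : Int × List Int) x => (st.1 + x, st.2 ++ [st.1 + x])) (0, [])).2).reverse
  (PySem.List.pyRange 0 ((dp1.length : Int) - 1) 1).foldl
    (fun res i =>
      PySem.Int.mod (res + PySem.List.pyGetD dp1 i 0 * PySem.List.pyGetD suffixSum (i + 1) 0)
        1000000007) 0

-- ===== PORT B =====
-- literal transliteration of Source B; state is (res, prefix, run)
def solve_alt (nums : List Int) (k : Int) : Int :=
  let st := nums.foldl (fun (st : Int × Int × Int) num =>
      if num ≥ k then (st.1, st.2.1, st.2.2 + 1)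
      else if st.2.2 ≠ 0 then
        let t := PySem.Int.floordiv (st.2.2 * (st.2.2 + 1)) 2
        (PySem.Int.mod (st.1 + t * st.2.1 +
            PySem.Int.floordiv ((st.2.2 + 2) * (st.2.2 + 1) * st.2.2 * (st.2.2 - 1)) 24)
          1000000007,
         st.2.1 + t, (0 : Int))
      else st) ((0 : Int), (0 : Int), (0 : Int))
  if st.2.2 ≠ 0 then
    let t := PySem.Int.floordiv (st.2.2 * (st.2.2 + 1)) 2
    PySem.Int.mod (st.1 + t * st.2.1 +
        PySem.Int.floordiv ((st.2.2 + 2) * (st.2.2 + 1) * st.2.2 * (st.2.2 - 1)) 24) 1000000007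
  else st.1

-- ===== PRECONDITION & SPEC =====
def Spec_solve (nums : List Int) (k : Int) (out : Int) : Prop := out = solve_alt nums k
instance (nums : List Int) (k : Int) (out : Int) : Decidable (Spec_solve nums k out) := by
  unfold Spec_solve; infer_instance

-- ===== CLAIM (what is proved, stated in full; the proofs are below) =====
def Claim_equal_solve : Prop := ∀ (nums : List Int) (k : Int), Dom_solve nums k → Spec_solve nums k (solve nums k)

-- ===== LEMMAS AND PROOFS =====

-- closed-form run counts
def c2 (n : Int) : Int := n * (n + 1) / 2
def c3 (n : Int) : Int := (n + 1) * n * (n - 1) / 6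
def c4 (n : Int) : Int := (n + 2) * (n + 1) * n * (n - 1) / 24

-- the qualifying mask
def bmap (k : Int) (nums : List Int) : List Bool := nums.map (fun x => decide (x ≥ k))

-- number of qualifying sublists of true^c ++ bs, run-based recursion
def subsF : Int → List Bool → Int
  | c, [] => c2 c
  | c, b :: t => if b then subsF (c + 1) t else c2 c + subsF 0 t

-- length of the leading true-run
def fRun : List Bool → Int
  | [] => 0
  | b :: t => if b then fRun t + 1 else 0

-- length of the trailing true-run, run accumulator c
def eRun : Int → List Bool → Int
  | c, [] => c
  | c, b :: t => eRun (if b then c + 1 else 0) t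

-- A's total: sum over positions of (run ending here) * (sublists strictly after)
def gF : Int → List Bool → Int
  | _, [] => 0
  | c, b :: t => (if b then c + 1 else 0) * subsF 0 t + gF (if b then c + 1 else 0) t

-- B's total: remaining contributions from state (run c, prefix p), incl. final flush
def hF : Int → Int → List Bool → Int
  | c, p, [] => c2 c * p + c4 c
  | c, p, b :: t => if b then hF (c + 1) p t else c2 c * p + c4 c + hF 0 (p + c2 c) t

-- structural forms of A's arrays
def dpL (k : Int) : Int → List Int → List Int
  | _, [] => []
  | c, x :: t => if x ≥ k then (c + 1) :: dpL k (c + 1) t else 0 :: dpL k 0 t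

def dEnd (k : Int) : Int → List Int → Int
  | c, [] => c
  | c, x :: t => dEnd k (if x ≥ k then c + 1 else 0) t

def accL : Int → List Int → List Int
  | _, [] => []
  | s, x :: t => (s + x) :: accL (s + x) t

def sufList (k : Int) : List Int → List Int
  | [] => []
  | x :: t => subsF 0 (bmap k (x :: t)) :: sufList k t

def sufT (k : Int) : List Int → List Int
  | [] => []
  | _ :: t => subsF 0 (bmap k t) :: sufT k t

-- ---- arithmetic of the closed forms ----
lemma c2_two (n : Int) : 2 * c2 n = n * (n + 1) :=
  Int.mul_ediv_cancel' (Int.even_mul_succ_self n).two_dvd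

lemma dvd6 (n : Int) : (6 : Int) ∣ (n + 1) * n * (n - 1) := by
  have h : ((((n + 1) * n * (n - 1) : Int) : ZMod 6) = 0) := by
    push_cast
    have : ∀ x : ZMod 6, (x + 1) * x * (x - 1) = 0 := by decide
    exact this _
  exact_mod_cast (ZMod.intCast_zmod_eq_zero_iff_dvd _ 6).mp h

lemma c3_six (n : Int) : 6 * c3 n = (n + 1) * n * (n - 1) :=
  Int.mul_ediv_cancel' (dvd6 n)

lemma dvd24 (n : Int) : (24 : Int) ∣ (n + 2) * (n + 1) * n * (n - 1) := by
  have h : ((((n + 2) * (n + 1) * n * (n - 1) : Int) : ZMod 24) = 0) := by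
    push_cast
    have : ∀ x : ZMod 24, (x + 2) * (x + 1) * x * (x - 1) = 0 := by decide
    exact this _
  exact_mod_cast (ZMod.intCast_zmod_eq_zero_iff_dvd _ 24).mp h

lemma c4_tf (n : Int) : 24 * c4 n = (n + 2) * (n + 1) * n * (n - 1) :=
  Int.mul_ediv_cancel' (dvd24 n)

lemma c2_zero : c2 0 = 0 := by decide
lemma c3_zero : c3 0 = 0 := by decide
lemma c4_zero : c4 0 = 0 := by decide

lemma c2_succ (n : Int) : c2 (n + 1) = c2 n + (n + 1) := by
  have h1 := c2_two (n + 1)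
  have h2 := c2_two n
  have key : (n + 1) * (n + 1 + 1) = n * (n + 1) + 2 * (n + 1) := by ring
  linarith

lemma c3_succ (n : Int) : c3 (n + 1) = c3 n + c2 n := by
  have h2 := c2_two n
  have h3 := c3_six n
  have h4 := c3_six (n + 1)
  have key : (n + 1 + 1) * (n + 1) * (n + 1 - 1) = (n + 1) * n * (n - 1) + 3 * (n * (n + 1)) := by
    ring
  linarith

lemma c4_succ (n : Int) : c4 (n + 1) = c4 n + c3 n + c2 n := by
  have h2 := c2_two n
  have h3 := c3_six n
  have h4 := c4_tf n
  have h5 := c4_tf (n + 1)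
  have key : (n + 1 + 2) * (n + 1 + 1) * (n + 1) * (n + 1 - 1)
      = (n + 2) * (n + 1) * n * (n - 1) + 4 * ((n + 1) * n * (n - 1)) + 12 * (n * (n + 1)) := by
    ring
  linarith

-- ---- unfolding helpers ----
lemma subsF_cons_true (c : Int) (l : List Bool) : subsF c (true :: l) = subsF (c + 1) l := rfl
lemma subsF_cons_false (c : Int) (l : List Bool) : subsF c (false :: l) = c2 c + subsF 0 l := rfl
lemma bmap_cons (k x : Int) (t : List Int) : bmap k (x :: t) = decide (x ≥ k) :: bmap k t := rfl
lemma bmap_reverse (k : Int) (t : List Int) : bmap k t.reverse = (bmap k t).reverse := by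
  simp [bmap]
lemma dpL_cons_pos (k c x : Int) (t : List Int) (h : x ≥ k) :
    dpL k c (x :: t) = (c + 1) :: dpL k (c + 1) t := by simp [dpL, h]
lemma dpL_cons_neg (k c x : Int) (t : List Int) (h : ¬ x ≥ k) :
    dpL k c (x :: t) = 0 :: dpL k 0 t := by simp [dpL, h]
lemma dEnd_cons_pos (k c x : Int) (t : List Int) (h : x ≥ k) :
    dEnd k c (x :: t) = dEnd k (c + 1) t := by simp [dEnd, h]
lemma dEnd_cons_neg (k c x : Int) (t : List Int) (h : ¬ x ≥ k) :
    dEnd k c (x :: t) = dEnd k 0 t := by simp [dEnd, h]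

-- ---- subsF structure ----
lemma subsF_append (u : List Bool) : ∀ (v : List Bool) (c : Int),
    subsF c (u ++ v) = subsF c u - c2 (eRun c u) + subsF (eRun c u) v := by
  induction u with
  | nil => intro v c; simp [subsF, eRun]
  | cons b t ih =>
    intro v c
    cases b
    · simp only [List.cons_append, subsF_cons_false, eRun, Bool.false_eq_true, if_false, ih]
      ring
    · simp only [List.cons_append, subsF_cons_true, eRun, if_true, ih]

lemma subsF_shift (t : List Bool) : ∀ c : Int,
    subsF c t = c2 (c + fRun t) - c2 (fRun t) + subsF 0 t := by
  induction t with
  | nil => intro c; simp [subsF, fRun, c2_zero]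
  | cons b u ih =>
    intro c
    cases b
    · simp [subsF_cons_false, fRun, c2_zero]
    · simp only [subsF_cons_true, fRun, if_true, zero_add]
      rw [ih (c + 1), ih 1]
      have e1 : c + 1 + fRun u = c + (fRun u + 1) := by ring
      have e2 : (1 : Int) + fRun u = fRun u + 1 := by ring
      rw [e1, e2]
      ring

lemma subsF_one (l : List Bool) : subsF 1 l = subsF 0 l + (fRun l + 1) := by
  rw [subsF_shift l 1]
  have e2 : (1 : Int) + fRun l = fRun l + 1 := by ring
  rw [e2, c2_succ]
  ring

lemma eRun_append_singleton (u : List Bool) : ∀ (c : Int) (b : Bool),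
    eRun c (u ++ [b]) = if b then eRun c u + 1 else 0 := by
  induction u with
  | nil => intro c b; cases b <;> simp [eRun]
  | cons x t ih => intro c b; simp [eRun, ih]

lemma eRun_reverse (t : List Bool) : eRun 0 t.reverse = fRun t := by
  induction t with
  | nil => simp [eRun, fRun]
  | cons b u ih =>
    cases b <;> simp [fRun, List.reverse_cons, eRun_append_singleton, ih]

lemma subsF_reverse (t : List Bool) : subsF 0 t.reverse = subsF 0 t := by
  induction t with
  | nil => simp
  | cons b u ih =>
    rw [List.reverse_cons, subsF_append, eRun_reverse]
    cases b
    · simp [subsF, c2_zero, ih]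
    · have h1 : subsF (fRun u) [true] = c2 (fRun u + 1) := rfl
      rw [h1, ih, subsF_cons_true, zero_add, subsF_one]
      rw [c2_succ]
      ring

-- ---- A's fold = structural lists ----
lemma getDp_fold (k : Int) (ns : List Int) : ∀ (c : Int) (acc : List Int),
    (ns.foldl (fun (st : Int × List Int) num =>
      if num ≥ k then (st.1 + 1, st.2 ++ [st.1 + 1]) else ((0 : Int), st.2 ++ [(0 : Int)]))
      (c, acc)) = (dEnd k c ns, acc ++ dpL k c ns) := by
  induction ns with
  | nil => intro c acc; simp [dEnd, dpL]
  | cons x t ih =>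
    intro c acc
    by_cases h : x ≥ k
    · rw [dpL_cons_pos k c x t h, dEnd_cons_pos k c x t h]
      simp [h, ih]
    · rw [dpL_cons_neg k c x t h, dEnd_cons_neg k c x t h]
      simp [h, ih]

lemma acc_fold (xs : List Int) : ∀ (s : Int) (acc : List Int),
    (xs.foldl (fun (st : Int × List Int) x => (st.1 + x, st.2 ++ [st.1 + x])) (s, acc))
      = (s + xs.sum, acc ++ accL s xs) := by
  induction xs with
  | nil => intro s acc; simp [accL]
  | cons x t ih =>
    intro s acc
    simp [accL, ih, add_assoc]

lemma dpL_append_singleton (k : Int) (u : List Int) : ∀ (c x : Int),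
    dpL k c (u ++ [x]) = dpL k c u ++ [if x ≥ k then dEnd k c u + 1 else 0] := by
  induction u with
  | nil => intro c x; by_cases h : x ≥ k <;> simp [h, dpL, dEnd]
  | cons y t ih =>
    intro c x
    by_cases h : y ≥ k
    · rw [List.cons_append, dpL_cons_pos k c y _ h, dpL_cons_pos k c y t h,
        dEnd_cons_pos k c y t h, ih]
      simp
    · rw [List.cons_append, dpL_cons_neg k c y _ h, dpL_cons_neg k c y t h,
        dEnd_cons_neg k c y t h, ih]
      simp

lemma accL_append_singleton (w : List Int) : ∀ (s y : Int),
    accL s (w ++ [y]) = accL s w ++ [s + w.sum + y] := by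
  induction w with
  | nil => intro s y; simp [accL]
  | cons x t ih =>
    intro s y
    simp [accL, ih]
    ring_nf

lemma sum_dpL (k : Int) (u : List Int) : ∀ c : Int,
    subsF c (bmap k u) = c2 c + (dpL k c u).sum := by
  induction u with
  | nil => intro c; simp [bmap, dpL, subsF]
  | cons x t ih =>
    intro c
    rw [bmap_cons]
    by_cases h : x ≥ k
    · rw [show (decide (x ≥ k)) = true by simp [h], subsF_cons_true,
        dpL_cons_pos k c x t h, List.sum_cons, ih (c + 1), c2_succ]
      ring
    · rw [show (decide (x ≥ k)) = false by simp [h], subsF_cons_false,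
        dpL_cons_neg k c x t h, List.sum_cons, ih 0, c2_zero]

lemma dEnd_eq_eRun (k : Int) (u : List Int) : ∀ c : Int, dEnd k c u = eRun c (bmap k u) := by
  induction u with
  | nil => intro c; simp [dEnd, bmap, eRun]
  | cons x t ih =>
    intro c
    rw [bmap_cons]
    by_cases h : x ≥ k
    · rw [dEnd_cons_pos k c x t h, show (decide (x ≥ k)) = true by simp [h]]
      simp only [eRun, if_true]
      exact ih (c + 1)
    · rw [dEnd_cons_neg k c x t h, show (decide (x ≥ k)) = false by simp [h]]
      simp only [eRun, Bool.false_eq_true, if_false]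
      exact ih 0

lemma suffix_eq_sufList (k : Int) (nums : List Int) :
    (accL 0 (dpL k 0 nums.reverse)).reverse = sufList k nums := by
  induction nums with
  | nil => simp [dpL, accL, sufList]
  | cons x t ih =>
    rw [List.reverse_cons, dpL_append_singleton, accL_append_singleton, List.reverse_append]
    simp only [List.reverse_singleton, List.singleton_append]
    rw [ih]
    have hsum : (dpL k 0 t.reverse).sum = subsF 0 (bmap k t) := by
      have h0 := sum_dpL k t.reverse 0
      rw [c2_zero, bmap_reverse, subsF_reverse] at h0
      omega
    have hend : dEnd k 0 t.reverse = fRun (bmap k t) := by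
      rw [dEnd_eq_eRun, bmap_reverse, eRun_reverse]
    rw [hsum, hend]
    simp only [sufList, zero_add]
    congr 1
    rw [bmap_cons]
    by_cases h : x ≥ k
    · rw [if_pos h, show (decide (x ≥ k)) = true by simp [h], subsF_cons_true, zero_add,
        subsF_one]
    · rw [if_neg h, show (decide (x ≥ k)) = false by simp [h], subsF_cons_false, c2_zero]
      ring

lemma sufT_eq (k : Int) (x : Int) (t : List Int) :
    sufT k (x :: t) = sufList k t ++ [0] := by
  induction t generalizing x with
  | nil =>
    show [subsF 0 (bmap k [])] = [] ++ [0]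
    simp [bmap, subsF, c2_zero]
  | cons y u ih =>
    show subsF 0 (bmap k (y :: u)) :: sufT k (y :: u) = sufList k (y :: u) ++ [0]
    rw [ih y]
    rfl

lemma length_dpL (k : Int) (u : List Int) : ∀ c, (dpL k c u).length = u.length := by
  induction u with
  | nil => intro c; simp [dpL]
  | cons x t ih =>
    intro c
    by_cases h : x ≥ k
    · rw [dpL_cons_pos k c x t h]; simp [ih]
    · rw [dpL_cons_neg k c x t h]; simp [ih]

lemma length_sufList (k : Int) (u : List Int) : (sufList k u).length = u.length := by
  induction u with
  | nil => simp [sufList]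
  | cons x t ih => simp [sufList, ih]

-- index shift: sufList at (j+1) is sufT at j
lemma getD_append_zero (l : List Int) (j : Nat) : (l ++ [0]).getD j 0 = l.getD j 0 := by
  rcases lt_or_ge j l.length with h | h
  · rw [List.getD_eq_getElem _ _ h, List.getD_eq_getElem _ _ (by simp; omega),
      List.getElem_append_left h]
  · rw [List.getD_eq_default _ _ h]
    rcases eq_or_lt_of_le h with h2 | h2
    · rw [List.getD_eq_getElem _ _ (by simp; omega), List.getElem_append_right (le_of_eq h2)]
      simp [← h2]
    · rw [List.getD_eq_default _ _ (by simp; omega)]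

lemma sufList_getD_succ (k : Int) (nums : List Int) (j : Nat) :
    (sufList k nums).getD (j + 1) 0 = (sufT k nums).getD j 0 := by
  cases nums with
  | nil => simp [sufList, sufT]
  | cons x t =>
    rw [sufT_eq, getD_append_zero]
    simp only [sufList, List.getD_cons_succ]

-- zip-sum over positions equals gF
lemma zipsum (k : Int) (nums : List Int) : ∀ c : Int,
    (((dpL k c nums).zip (sufT k nums)).map (fun p => p.1 * p.2)).sum = gF c (bmap k nums) := by
  induction nums with
  | nil => intro c; simp [dpL, sufT, gF, bmap]
  | cons x t ih =>
    intro c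
    by_cases h : x ≥ k <;> simp [h, dpL, sufT, gF, bmap, ih]

-- indexed sum = zip sum
lemma idx_sum (xs : List Int) : ∀ ys : List Int, ys.length = xs.length →
    (((List.range xs.length).map (fun j => xs.getD j 0 * ys.getD j 0)).sum
      = ((xs.zip ys).map (fun p => p.1 * p.2)).sum) := by
  induction xs with
  | nil => intro ys h; simp
  | cons x t ih =>
    intro ys h
    cases ys with
    | nil => simp at h
    | cons y u =>
      simp only [List.length_cons, List.range_succ_eq_map, List.map_cons, List.map_map,
        List.sum_cons, List.zip_cons_cons]
      rw [← ih u (by simpa using h)]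
      simp [Function.comp_def]

-- stepwise mod fold
lemma foldmod (M : Int) (f : Int → Int) (l : List Int) : ∀ r : Int,
    l.foldl (fun res i => (res + f i) % M) (r % M) = (r + (l.map f).sum) % M := by
  induction l with
  | nil => intro r; simp
  | cons a t ih =>
    intro r
    simp only [List.foldl_cons, List.map_cons, List.sum_cons]
    rw [Int.emod_add_emod, ih (r + f a)]
    ring_nf

lemma length_sufT (k : Int) (u : List Int) : (sufT k u).length = u.length := by
  induction u with
  | nil => simp [sufT]
  | cons x t ih => simp [sufT, ih]

lemma fd2 (c : Int) : PySem.Int.floordiv (c * (c + 1)) 2 = c2 c := by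
  rw [PySem.Int.floordiv_eq_ediv_of_pos (by norm_num)]; rfl

lemma fd24 (c : Int) : PySem.Int.floordiv ((c + 2) * (c + 1) * c * (c - 1)) 24 = c4 c := by
  rw [PySem.Int.floordiv_eq_ediv_of_pos (by norm_num)]; rfl

lemma hF_cons_true (c p : Int) (t : List Bool) : hF c p (true :: t) = hF (c + 1) p t := rfl
lemma hF_cons_false (c p : Int) (t : List Bool) :
    hF c p (false :: t) = c2 c * p + c4 c + hF 0 (p + c2 c) t := rfl

-- ---- characterization of port A ----
lemma solve_eq (nums : List Int) (k : Int) :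
    solve nums k = gF 0 (bmap k nums) % 1000000007 := by
  simp only [solve]
  rw [getDp_fold, getDp_fold, acc_fold]
  simp only [List.nil_append]
  rw [suffix_eq_sufList, length_dpL]
  rcases Nat.eq_zero_or_pos nums.length with hn | hn
  · rw [List.length_eq_zero_iff] at hn
    subst hn
    simp [dpL, sufList, PySem.List.pyRange_one_eq_nil, gF, bmap]
  · set n := nums.length with hdefn
    set f : Int → Int := fun i =>
      PySem.List.pyGetD (dpL k 0 nums) i 0 * PySem.List.pyGetD (sufList k nums) (i + 1) 0
      with hdeff
    have hmod : ∀ (l : List Int) (r : Int),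
        l.foldl (fun res i => PySem.Int.mod (res + f i) 1000000007) (r % 1000000007)
          = (r + (l.map f).sum) % 1000000007 := by
      intro l r
      have h := foldmod 1000000007 f l r
      simp only [PySem.Int.mod_eq_emod_of_pos (show (0:Int) < 1000000007 by norm_num)]
      exact h
    have h0 := hmod (PySem.List.pyRange 0 ((n : Int) - 1) 1) 0
    rw [Int.zero_emod] at h0
    rw [h0, zero_add]
    -- extend the range by the vanishing last term
    have hlast : f ((n : Int) - 1) = 0 := by
      rw [hdeff]
      have e1 : ((n : Int) - 1) + 1 = ((n : Nat) : Int) := by ring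
      simp only [e1]
      rw [PySem.List.pyGetD_natCast]
      rw [List.getD_eq_default _ _ (by rw [length_sufList])]
      ring
    have hsplit : PySem.List.pyRange 0 ((n : Int)) 1
        = PySem.List.pyRange 0 ((n : Int) - 1) 1 ++ [(n : Int) - 1] := by
      have h2 := PySem.List.pyRange_one_succ_right (a := 0) (b := ((n : Int) - 1)) (by omega)
      rw [sub_add_cancel] at h2
      exact h2
    have hsum : ((PySem.List.pyRange 0 ((n : Int)) 1).map f).sum
        = ((PySem.List.pyRange 0 ((n : Int) - 1) 1).map f).sum := by
      rw [hsplit]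
      simp [hlast]
    rw [← hsum]
    -- convert to a Nat-indexed sum
    rw [PySem.List.pyRange_one, List.map_map]
    have hfun : ((fun i => f i) ∘ fun j : Nat => (0 : Int) + (j : Int))
        = fun j : Nat => (dpL k 0 nums).getD j 0 * (sufT k nums).getD j 0 := by
      funext j
      simp only [Function.comp_apply, zero_add, hdeff]
      have e2 : ((j : Int) + 1) = ((j + 1 : Nat) : Int) := by push_cast; ring
      rw [PySem.List.pyGetD_natCast, e2, PySem.List.pyGetD_natCast, sufList_getD_succ]
    rw [hfun]
    have e3 : (((n : Int)) - 0).toNat = (dpL k 0 nums).length := by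
      rw [length_dpL]; omega
    rw [e3, idx_sum _ _ (by rw [length_sufT, length_dpL]), zipsum]

-- ---- characterization of port B ----
lemma loopB (k : Int) (t : List Int) : ∀ (res p : Int) (rn : Nat),
    res % 1000000007 = res →
    (let st := t.foldl (fun (st : Int × Int × Int) num =>
        if num ≥ k then (st.1, st.2.1, st.2.2 + 1)
        else if st.2.2 ≠ 0 then
          let tt := PySem.Int.floordiv (st.2.2 * (st.2.2 + 1)) 2
          (PySem.Int.mod (st.1 + tt * st.2.1 +
              PySem.Int.floordiv ((st.2.2 + 2) * (st.2.2 + 1) * st.2.2 * (st.2.2 - 1)) 24)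
            1000000007,
           st.2.1 + tt, (0 : Int))
        else st) (res, p, (rn : Int));
      if st.2.2 ≠ 0 then
        let tt := PySem.Int.floordiv (st.2.2 * (st.2.2 + 1)) 2
        PySem.Int.mod (st.1 + tt * st.2.1 +
            PySem.Int.floordiv ((st.2.2 + 2) * (st.2.2 + 1) * st.2.2 * (st.2.2 - 1)) 24)
          1000000007
      else st.1)
      = (res + hF (rn : Int) p (bmap k t)) % 1000000007 := by
  induction t with
  | nil =>
    intro res p rn hres
    simp only [List.foldl_nil]
    show (if ((rn : Int)) ≠ 0 then _ else _) = _
    rcases Nat.eq_zero_or_pos rn with h0 | h0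
    · subst h0
      rw [if_neg (by simp)]
      show res = (res + hF 0 p []) % 1000000007
      show res = (res + (c2 0 * p + c4 0)) % 1000000007
      rw [c2_zero, c4_zero]
      simp [hres]
    · rw [if_pos (show ((rn : Int)) ≠ 0 by omega)]
      show PySem.Int.mod (res + PySem.Int.floordiv ((rn : Int) * ((rn : Int) + 1)) 2 * p +
          PySem.Int.floordiv (((rn : Int) + 2) * ((rn : Int) + 1) * (rn : Int) * ((rn : Int) - 1)) 24)
          1000000007 = (res + hF (rn : Int) p []) % 1000000007
      rw [fd2, fd24, PySem.Int.mod_eq_emod_of_pos (by norm_num)]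
      show _ = (res + (c2 (rn : Int) * p + c4 (rn : Int))) % 1000000007
      rw [add_assoc]
  | cons x t ih =>
    intro res p rn hres
    by_cases hx : x ≥ k
    · simp only [List.foldl_cons, hx, if_true, bmap_cons, decide_true, hF_cons_true]
      have e : ((rn : Int)) + 1 = ((rn + 1 : Nat) : Int) := by push_cast; ring
      rw [e]
      exact ih res p (rn + 1) hres
    · simp only [List.foldl_cons, if_neg hx, bmap_cons]
      rw [show (decide (x ≥ k)) = false by simp [hx]]
      rcases Nat.eq_zero_or_pos rn with h0 | h0
      · subst h0
        simp only [Nat.cast_zero]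
        rw [if_neg (show ¬((0 : Int) ≠ 0) by simp)]
        rw [hF_cons_false, c2_zero, c4_zero]
        simp only [zero_mul, add_zero, zero_add]
        have h2 := ih res p 0 hres
        simp only [Nat.cast_zero] at h2
        exact h2
      · rw [if_pos (show ((rn : Int)) ≠ 0 by omega)]
        rw [hF_cons_false]
        have hres' : (res + c2 (rn : Int) * p + c4 (rn : Int)) % 1000000007 % 1000000007
            = (res + c2 (rn : Int) * p + c4 (rn : Int)) % 1000000007 :=
          Int.emod_emod_of_dvd _ dvd_rfl
        have hstep := ih ((res + c2 (rn : Int) * p + c4 (rn : Int)) % 1000000007)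
          (p + c2 (rn : Int)) 0 hres'
        simp only [Nat.cast_zero] at hstep
        rw [fd2, fd24, PySem.Int.mod_eq_emod_of_pos (by norm_num)]
        rw [hstep, Int.emod_add_emod]
        congr 1
        ring

lemma solve_alt_eq (nums : List Int) (k : Int) :
    solve_alt nums k = hF 0 0 (bmap k nums) % 1000000007 := by
  simp only [solve_alt]
  have h := loopB k nums 0 0 0 (by norm_num)
  simp only [Nat.cast_zero, zero_add] at h
  exact h

-- ---- the combinatorial core: hF = gF ----
lemma subsF_replicate (c : Nat) : ∀ (a : Int) (r : List Bool),
    subsF a (List.replicate c true ++ r) = subsF (a + c) r := by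
  induction c with
  | zero => intro a r; simp
  | succ m ih =>
    intro a r
    rw [List.replicate_succ]
    simp only [List.cons_append, subsF, if_true]
    rw [ih (a + 1)]
    congr 1
    push_cast
    ring

lemma gF_replicate (c : Nat) : ∀ a : Int,
    gF a (List.replicate c true) = a * c3 c + c4 c := by
  induction c with
  | zero => intro a; simp [gF, c3_zero, c4_zero]
  | succ m ih =>
    intro a
    rw [List.replicate_succ]
    simp only [gF, if_true]
    rw [ih (a + 1)]
    have hs : subsF 0 (List.replicate m true) = c2 m := by
      have := subsF_replicate m 0 []
      simpa [subsF] using this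
    rw [hs]
    push_cast [c3_succ, c4_succ]
    ring

lemma gF_replicate_false (c : Nat) : ∀ (a : Int) (t : List Bool),
    gF a (List.replicate c true ++ false :: t)
      = a * c3 c + c4 c + (a * c + c2 c) * subsF 0 t + gF 0 t := by
  induction c with
  | zero => intro a t; simp [gF, c3_zero, c4_zero, c2_zero]
  | succ m ih =>
    intro a t
    rw [List.replicate_succ]
    simp only [List.cons_append, gF, if_true]
    rw [ih (a + 1)]
    have hs : subsF 0 (List.replicate m true ++ false :: t) = c2 m + subsF 0 t := by
      rw [subsF_replicate m 0 (false :: t)]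
      simp [subsF]
    rw [hs]
    push_cast [c3_succ, c4_succ, c2_succ]
    ring

lemma hF_eq_gF (bs : List Bool) : ∀ (c : Nat) (p : Int),
    hF c p bs = gF 0 (List.replicate c true ++ bs)
      + p * subsF 0 (List.replicate c true ++ bs) := by
  induction bs with
  | nil =>
    intro c p
    simp only [List.append_nil, hF]
    rw [gF_replicate]
    have hs : subsF 0 (List.replicate c true) = c2 c := by
      have := subsF_replicate c 0 []
      simpa [subsF] using this
    rw [hs]; ring
  | cons b t ih =>
    intro c p
    cases b
    · simp only [hF, Bool.false_eq_true, if_false]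
      have h0 := ih 0 (p + c2 c)
      simp only [Nat.cast_zero, List.replicate_zero, List.nil_append] at h0
      rw [h0, gF_replicate_false, subsF_replicate c 0 (false :: t), zero_add, subsF_cons_false]
      ring
    · simp only [hF, if_true]
      have h1 : (c : Int) + 1 = ((c + 1 : Nat) : Int) := by push_cast; ring
      rw [h1, ih (c + 1)]
      have h2 : List.replicate (c + 1) true ++ t = List.replicate c true ++ true :: t := by
        rw [List.replicate_succ']; simp
      rw [h2]

-- ===== VERDICT (by name: the statement is the Claim_ definition above) =====
theorem solve_spec : Claim_equal_solve := by
  intro nums k _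
  unfold Spec_solve
  rw [solve_eq, solve_alt_eq]
  have := hF_eq_gF (bmap k nums) 0 0
  simp only [Nat.cast_zero, List.replicate_zero, List.nil_append, zero_mul, add_zero] at this
  rw [this]
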